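-- pv_equiv track=rewrite | github.com/bird-bench/BIRD-RL | bird_rl/inference/bird/generate_prompts.py | get_column_descriptions
-- ===== SOURCE A (Python) =====
-- def get_column_descriptions(db_id: str, column_meanings: dict) -> str:
--     """Get column descriptions for a database from column_meaning.json."""
--     table_columns = {}
--     prefix = f"{db_id}|"
--     for key, description in column_meanings.items():
--         if not key.startswith(prefix):
--             continue
--         parts = key.split("|")
--         if len(parts) != 3:
--             continue
--         _, table_name, col_name = parts
--         if table_name not in table_columns:
--             table_columns[table_name] = []
--         table_columns[table_name].append((col_name, description))
--
--     if not table_columns: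
--         return "(No column descriptions available)"
--
--     lines = []
--     for table_name in sorted(table_columns.keys()):
--         lines.append(f"Table: {table_name}")
--         for col_name, desc in table_columns[table_name]:
--             lines.append(f"  - {col_name}: {desc}")
--     return "\n".join(lines)
-- ===== SOURCE B (Python) =====
-- def get_column_descriptions(db_id: str, column_meanings: dict) -> str:
--     """Get column descriptions for a database from column_meaning.json."""
--     prefix = db_id + "|"
--
--     def as_row(item):
--         key, desc = item
--         parts = key.split("|")
--         if key.startswith(prefix) and len(parts) == 3:
--             return (parts[1], parts[2], desc)
--         return None
--
--     rows = [r for r in map(as_row, column_meanings.items()) if r is not None]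
--     if not rows:
--         return "(No column descriptions available)"
--     rows.sort(key=lambda r: r[0])  # stable: keeps each table's column order
--     lines = []
--     while rows:
--         table = rows[0][0]
--         i = 1
--         while i < len(rows) and rows[i][0] == table:
--             i += 1
--         lines.append("Table: " + table)
--         lines.extend("  - " + col + ": " + desc for _, col, desc in rows[:i])
--         rows = rows[i:]
--     return "\n".join(lines)
-- ===== Notes on version B (the rewrite author's own statement) =====
-- stated objective: alternative
-- what changed: B replaces A's dict-of-lists grouping plus sorted-keys emission by a sort-then-scan: filter items into a flat list of (table, col, desc) rows, stable-sort the rows by table name, then emit headers and columns in one linear group-by scan over the sorted list.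
import Mathlib
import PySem

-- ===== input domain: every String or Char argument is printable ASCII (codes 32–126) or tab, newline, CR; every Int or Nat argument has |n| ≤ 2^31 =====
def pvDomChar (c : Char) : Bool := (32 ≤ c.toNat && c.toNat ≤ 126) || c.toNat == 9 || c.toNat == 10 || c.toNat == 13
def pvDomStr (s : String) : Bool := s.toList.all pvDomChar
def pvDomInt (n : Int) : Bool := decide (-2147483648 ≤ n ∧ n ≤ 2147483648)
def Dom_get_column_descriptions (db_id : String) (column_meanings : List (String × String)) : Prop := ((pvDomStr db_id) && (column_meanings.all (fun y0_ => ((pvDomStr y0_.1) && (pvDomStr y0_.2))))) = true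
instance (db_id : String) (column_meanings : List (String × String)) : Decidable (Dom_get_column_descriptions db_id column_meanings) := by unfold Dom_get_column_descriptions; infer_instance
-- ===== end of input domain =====

-- B replaces A's dict-of-lists grouping by a sort-then-scan: filter into a flat row list,
-- stable-sort by table name, emit in one linear group-by pass (objective: alternative; same return value).
-- The dict argument is modelled as PySem.Dict.ofList of the association list (duplicate keys collapse as in Python).
-- key.split("|") is PySem.Str.split? with the literal nonempty separator "|", so `.getD []` is exact (split? is always `some`).

-- ===== PORT A =====
def get_column_descriptions (db_id : String) (column_meanings : List (String × String)) : String :=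
  let pfx := db_id ++ "|"
  let table_columns : PySem.Dict String (List (String × String)) :=
    (PySem.Dict.ofList column_meanings).items.foldl (fun tc kv =>
      if PySem.Str.startswith kv.1 pfx = false then tc   -- 'continue'
      else
        let parts := (PySem.Str.split? kv.1 "|").getD []
        if parts.length ≠ 3 then tc                      -- 'continue'
        else
          -- `if table_name not in tc: tc[table_name] = []` then `.append(...)`, as one Dict.modify
          PySem.Dict.modify tc parts[1]! [] (fun l => l ++ [(parts[2]!, kv.2)]))
      PySem.Dict.empty
  if table_columns.items.isEmpty then "(No column descriptions available)"
  else
    let lines := (PySem.List.sorted table_columns.keys (fun x => x) false).foldl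
      (fun lines table_name =>
        (PySem.Dict.getD table_columns table_name []).foldl
          (fun lines cd => lines ++ ["  - " ++ cd.1 ++ ": " ++ cd.2])
          (lines ++ ["Table: " ++ table_name])) []
    PySem.Str.join "\n" lines

-- ===== PORT B =====
-- helper `as_row` of Source B: one item → optional (table, col, desc) row
def pvRow (pfx : String) (kv : String × String) : Option (String × String × String) :=
  let parts := (PySem.Str.split? kv.1 "|").getD []
  if PySem.Str.startswith kv.1 pfx && parts.length == 3
  then some (parts[1]!, parts[2]!, kv.2) else none

-- Source B's outer `while rows:` scan: rows[:i] is the run of the leading table name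
-- (takeWhile = the inner index scan), rows[i:] the rest
def pvEmit (rows : List (String × String × String)) : List String :=
  match rows with
  | [] => []
  | r :: rest =>
    ("Table: " ++ r.1)
      :: ((r :: rest).takeWhile (fun x => x.1 == r.1)).map
           (fun x => "  - " ++ x.2.1 ++ ": " ++ x.2.2)
      ++ pvEmit ((r :: rest).dropWhile (fun x => x.1 == r.1))
  termination_by rows.length
  decreasing_by
    simp only [List.dropWhile_cons, beq_self_eq_true, if_true, List.length_cons]
    exact Nat.lt_succ_of_le (List.length_dropWhile_le _ _)

def get_column_descriptions_alt (db_id : String) (column_meanings : List (String × String)) : String :=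
  let rows := (PySem.Dict.ofList column_meanings).items.filterMap (pvRow (db_id ++ "|"))
  if rows.isEmpty then "(No column descriptions available)"
  else PySem.Str.join "\n" (pvEmit (PySem.List.sorted rows (fun r => r.1) false))

-- ===== PRECONDITION & SPEC =====
def Spec_get_column_descriptions (db_id : String) (column_meanings : List (String × String)) (out : String) : Prop := out = get_column_descriptions_alt db_id column_meanings
instance (db_id : String) (column_meanings : List (String × String)) (out : String) : Decidable (Spec_get_column_descriptions db_id column_meanings out) := by unfold Spec_get_column_descriptions; infer_instance

-- ===== CLAIM (what is proved, stated in full; the proofs are below) =====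
def Claim_equal_get_column_descriptions : Prop := ∀ (db_id : String) (column_meanings : List (String × String)), Dom_get_column_descriptions db_id column_meanings → Spec_get_column_descriptions db_id column_meanings (get_column_descriptions db_id column_meanings)

-- ===== LEMMAS AND PROOFS =====

-- the shared per-item filter test and extraction
def pvOk (pfx : String) (kv : String × String) : Bool :=
  PySem.Str.startswith kv.1 pfx && (((PySem.Str.split? kv.1 "|").getD []).length == 3)

def pvTr (kv : String × String) : String × String × String :=
  (((PySem.Str.split? kv.1 "|").getD [])[1]!, ((PySem.Str.split? kv.1 "|").getD [])[2]!, kv.2)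

def pvFmt (x : String × String × String) : String := "  - " ++ x.2.1 ++ ": " ++ x.2.2

-- B's filterMap is filter-then-map
theorem pvFilterMap_eq (pfx : String) (L : List (String × String)) :
    L.filterMap (pvRow pfx) = (L.filter (pvOk pfx)).map pvTr := by
  induction L with
  | nil => rfl
  | cons hd tl ih =>
    have hrow : pvRow pfx hd = if pvOk pfx hd then some (pvTr hd) else none := rfl
    rw [List.filterMap_cons, hrow, List.filter_cons]
    by_cases h : pvOk pfx hd = true
    · rw [if_pos h, if_pos h, List.map_cons, ih]
    · rw [if_neg h, if_neg h, ih]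

-- A's accumulation loop equals a plain modify-loop over the filtered/extracted list
theorem pvDictFold_eq (pfx : String) (L : List (String × String))
    (d : PySem.Dict String (List (String × String))) :
    L.foldl (fun tc kv =>
      if PySem.Str.startswith kv.1 pfx = false then tc
      else
        let parts := (PySem.Str.split? kv.1 "|").getD []
        if parts.length ≠ 3 then tc
        else PySem.Dict.modify tc parts[1]! [] (fun l => l ++ [(parts[2]!, kv.2)])) d
    = ((L.filter (pvOk pfx)).map pvTr).foldl
        (fun tc p => PySem.Dict.modify tc p.1 [] (fun l => l ++ [p.2])) d := by
  induction L generalizing d with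
  | nil => simp
  | cons hd tl ih =>
      simp only [List.foldl_cons, List.filter_cons]
      by_cases hs : PySem.Str.startswith hd.1 pfx = true
      · by_cases hl : ((PySem.Str.split? hd.1 "|").getD []).length = 3
        · have hb : (((PySem.Str.split? hd.1 "|").getD []).length == 3) = true := by
            rw [beq_iff_eq]; exact_mod_cast hl
          have hok : pvOk pfx hd = true := by
            simp only [pvOk, hs, hb, Bool.and_self]
          rw [if_neg (by simp only [hs]; decide), if_neg (not_not_intro hl), ih]
          simp [hok, pvTr]
        · have hb : (((PySem.Str.split? hd.1 "|").getD []).length == 3) = false := by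
            rw [beq_eq_false_iff_ne]; exact_mod_cast hl
          have hok : pvOk pfx hd = false := by
            simp only [pvOk, hb, Bool.and_false]
          rw [if_neg (by simp only [hs]; decide), if_pos hl, ih]
          simp [hok]
      · have hs' : PySem.Str.startswith hd.1 pfx = false := by
          exact Bool.not_eq_true _ ▸ (Bool.eq_false_iff.mpr hs)
        have hok : pvOk pfx hd = false := by
          simp only [pvOk, hs', Bool.false_and]
        rw [if_pos hs', ih]
        simp [hok]

-- ---- stability of PySem's insertion sort, expressed through `filter` ----

theorem pvInsert_pairwise (x : String × String × String) (ys : List (String × String × String))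
    (h : ys.Pairwise (fun a b => a.1 ≤ b.1)) :
    (PySem.List.insertBy (fun a b => decide (a.1 < b.1)) x ys).Pairwise (fun a b => a.1 ≤ b.1) := by
  induction ys with
  | nil => simp [PySem.List.insertBy]
  | cons y ys ih =>
    rw [List.pairwise_cons] at h
    by_cases hlt : x.1 < y.1
    · simp only [PySem.List.insertBy, decide_eq_true_eq, if_pos hlt]
      refine List.Pairwise.cons ?_ (List.Pairwise.cons h.1 h.2)
      intro z hz
      rcases List.mem_cons.mp hz with hz | hz
      · exact le_of_lt (hz ▸ hlt)
      · exact le_of_lt (lt_of_lt_of_le hlt (h.1 z hz))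
    · simp only [PySem.List.insertBy, decide_eq_true_eq, if_neg hlt]
      refine List.Pairwise.cons ?_ (ih h.2)
      intro z hz
      rcases (PySem.List.mem_insertBy _ _ _ _).mp hz with hz | hz
      · exact hz ▸ le_of_not_gt hlt
      · exact h.1 z hz

theorem pvInsert_filter (t : String) (x : String × String × String)
    (ys : List (String × String × String))
    (h : ys.Pairwise (fun a b => a.1 ≤ b.1)) :
    (PySem.List.insertBy (fun a b => decide (a.1 < b.1)) x ys).filter (fun y => y.1 == t)
      = ys.filter (fun y => y.1 == t) ++ (if x.1 == t then [x] else []) := by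
  induction ys with
  | nil => simp [PySem.List.insertBy, List.filter_cons]
  | cons y ys ih =>
    rw [List.pairwise_cons] at h
    by_cases hlt : x.1 < y.1
    · simp only [PySem.List.insertBy, decide_eq_true_eq, if_pos hlt]
      by_cases hx : (x.1 == t) = true
      · have hxt : x.1 = t := beq_iff_eq.mp hx
        have hnone : ∀ z ∈ y :: ys, (z.1 == t) = false := by
          intro z hz
          rcases List.mem_cons.mp hz with hz | hz
          · subst hz; exact beq_eq_false_iff_ne.mpr (by rw [← hxt]; exact (ne_of_lt hlt).symm)
          · exact beq_eq_false_iff_ne.mpr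
              (by rw [← hxt]; exact (ne_of_lt (lt_of_lt_of_le hlt (h.1 z hz))).symm)
        have hnil : (y :: ys).filter (fun w => w.1 == t) = [] := by
          rw [List.filter_eq_nil_iff]
          intro z hz
          exact Bool.eq_false_iff.mp (hnone z hz)
        simp [hx, hnil]
      · have hx' : (x.1 == t) = false := Bool.eq_false_iff.mpr hx
        simp [List.filter_cons, hx']
    · simp only [PySem.List.insertBy, decide_eq_true_eq, if_neg hlt]
      rw [List.filter_cons, List.filter_cons, ih h.2]
      by_cases hy : (y.1 == t) = true <;> simp [hy]

theorem pvFoldl_insert_filter (t : String) (xs : List (String × String × String)) :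
    ∀ acc : List (String × String × String), acc.Pairwise (fun a b => a.1 ≤ b.1) →
    (xs.foldl (fun acc x => PySem.List.insertBy (fun a b => decide (a.1 < b.1)) x acc) acc).filter
        (fun y => y.1 == t)
      = acc.filter (fun y => y.1 == t) ++ xs.filter (fun y => y.1 == t) := by
  induction xs with
  | nil => intro acc _; simp
  | cons x xs ih =>
    intro acc hacc
    rw [List.foldl_cons, ih _ (pvInsert_pairwise x acc hacc), pvInsert_filter t x acc hacc,
      List.filter_cons, List.append_assoc]
    by_cases hx : (x.1 == t) = true <;> simp [hx]

-- sorted-by-table preserves each table's row order (stability, through filter)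
theorem pvSorted_filter (t : String) (M : List (String × String × String)) :
    (PySem.List.sorted M (fun r => r.1) false).filter (fun y => y.1 == t)
      = M.filter (fun y => y.1 == t) := by
  rw [PySem.List.sorted_eq_foldl_insertBy]
  simpa using pvFoldl_insert_filter t M [] List.Pairwise.nil

-- in a key-sorted list whose keys are all ≥ t, the leading t-run is exactly the t-filter
theorem pvTakeDrop (ys : List (String × String × String)) (t : String)
    (h : ys.Pairwise (fun a b => a.1 ≤ b.1)) (hmin : ∀ z ∈ ys, t ≤ z.1) :
    ys.takeWhile (fun x => x.1 == t) = ys.filter (fun x => x.1 == t)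
      ∧ ∀ z ∈ ys.dropWhile (fun x => x.1 == t), z.1 ≠ t := by
  induction ys with
  | nil => exact ⟨rfl, by simp⟩
  | cons y ys ih =>
    rw [List.pairwise_cons] at h
    by_cases hy : (y.1 == t) = true
    · have hyt : y.1 = t := beq_iff_eq.mp hy
      have hih := ih h.2 (fun z hz => hyt ▸ h.1 z hz)
      refine ⟨?_, ?_⟩
      · simp [hy, hih.1]
      · simp only [List.dropWhile_cons, hy, if_true]
        exact hih.2
    · have hyt : t < y.1 :=
        lt_of_le_of_ne (hmin y (List.mem_cons_self)) (fun he => hy (beq_iff_eq.mpr he.symm))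
      have hgt : ∀ z ∈ y :: ys, z.1 ≠ t := by
        intro z hz
        rcases List.mem_cons.mp hz with hz | hz
        · exact hz ▸ (ne_of_gt hyt)
        · exact ne_of_gt (lt_of_lt_of_le hyt (h.1 z hz))
      have hy' : (y.1 == t) = false := Bool.eq_false_iff.mpr hy
      have hnil : (y :: ys).filter (fun x => x.1 == t) = [] := by
        rw [List.filter_eq_nil_iff]
        intro z hz
        exact Bool.eq_false_iff.mp (beq_eq_false_iff_ne.mpr (hgt z hz))
      refine ⟨?_, ?_⟩
      · simp [hy', hnil]
      · simp only [List.dropWhile_cons, hy', Bool.false_eq_true, if_false]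
        exact hgt

-- the group-by scan on a key-sorted list is the flatMap over its strictly sorted key list
theorem pvEmit_eq (n : ℕ) : ∀ (ys : List (String × String × String)) (S : List String),
    ys.length ≤ n →
    ys.Pairwise (fun a b => a.1 ≤ b.1) →
    S.Pairwise (· < ·) →
    (∀ k, k ∈ S ↔ k ∈ ys.map (fun y => y.1)) →
    pvEmit ys = S.flatMap (fun t =>
      ("Table: " ++ t) :: (ys.filter (fun y => y.1 == t)).map pvFmt) := by
  induction n with
  | zero =>
    intro ys S hlen _ _ hS
    have hys : ys = [] := List.eq_nil_of_length_eq_zero (Nat.le_zero.mp hlen)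
    subst hys
    have : S = [] := by
      cases S with
      | nil => rfl
      | cons s S' => exact absurd ((hS s).mp (List.mem_cons_self)) (by simp)
    subst this; rw [pvEmit]; simp
  | succ n ih =>
    intro ys S hlen hsorted hSlt hS
    cases ys with
    | nil =>
      have : S = [] := by
        cases S with
        | nil => rfl
        | cons s S' => exact absurd ((hS s).mp (List.mem_cons_self)) (by simp)
      subst this; rw [pvEmit]; simp
    | cons r rest =>
      rw [List.pairwise_cons] at hsorted
      have hmin : ∀ z ∈ r :: rest, r.1 ≤ z.1 := by
        intro z hz
        rcases List.mem_cons.mp hz with hz | hz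
        · exact hz ▸ le_refl _
        · exact hsorted.1 z hz
      -- S = r.1 :: S'
      have hrS : r.1 ∈ S := (hS r.1).mpr (by simp)
      obtain ⟨s, S', rfl⟩ : ∃ s S', S = s :: S' := by
        cases S with
        | nil => exact absurd hrS (by simp)
        | cons s S' => exact ⟨s, S', rfl⟩
      rw [List.pairwise_cons] at hSlt
      have hsr : s = r.1 := by
        obtain ⟨y, hy, hys⟩ := List.mem_map.mp ((hS s).mp (List.mem_cons_self))
        have hrs : r.1 ≤ s := hys ▸ hmin y hy
        rcases List.mem_cons.mp hrS with h1 | h1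
        · exact h1.symm
        · exact absurd (hSlt.1 _ h1) (not_lt.mpr hrs)
      subst hsr
      have hpw := List.Pairwise.cons hsorted.1 hsorted.2
      have htd := pvTakeDrop (r :: rest) r.1 hpw hmin
      have hdw_sub : List.Sublist ((r :: rest).dropWhile (fun x => x.1 == r.1)) (r :: rest) :=
        List.dropWhile_sublist _
      have hdw_pw := hpw.sublist hdw_sub
      have hsplit := List.takeWhile_append_dropWhile
        (p := fun (x : String × String × String) => x.1 == r.1) (l := r :: rest)
      have hlen' : ((r :: rest).dropWhile (fun x => x.1 == r.1)).length ≤ n := by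
        have : (r :: rest).dropWhile (fun x => x.1 == r.1) = rest.dropWhile (fun x => x.1 == r.1) := by
          rw [List.dropWhile_cons_of_pos (by simp)]
        rw [this]
        exact le_trans (List.length_dropWhile_le _ _) (Nat.le_of_succ_le_succ hlen)
      -- keys of the dropped suffix = S'
      have hS' : ∀ k, k ∈ S' ↔ k ∈ ((r :: rest).dropWhile (fun x => x.1 == r.1)).map (fun y => y.1) := by
        intro k
        constructor
        · intro hk
          have hkgt : r.1 < k := hSlt.1 k hk
          obtain ⟨y, hy, hyk⟩ := List.mem_map.mp ((hS k).mp (List.mem_cons_of_mem _ hk))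
          rw [← hsplit] at hy
          rcases List.mem_append.mp hy with hy | hy
          · exfalso
            have hzr : (y.1 == r.1) = true :=
              List.mem_takeWhile_imp (p := fun x : String × String × String => x.1 == r.1) hy
            exact (ne_of_gt hkgt) (by rw [← hyk, beq_iff_eq.mp hzr])
          · exact List.mem_map.mpr ⟨y, hy, hyk⟩
        · intro hk
          obtain ⟨y, hy, hyk⟩ := List.mem_map.mp hk
          have hkys : k ∈ (r :: rest).map (fun y => y.1) :=
            List.mem_map.mpr ⟨y, hdw_sub.mem hy, hyk⟩
          rcases List.mem_cons.mp ((hS k).mpr hkys) with h1 | h1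
          · exact absurd (hyk ▸ h1) (htd.2 y hy)
          · exact h1
      have hih := ih _ S' hlen' hdw_pw hSlt.2 hS'
      -- filters of ys for later keys live entirely in the dropped suffix
      have hfil : ∀ t' ∈ S',
          ((r :: rest).dropWhile (fun x => x.1 == r.1)).filter (fun y => y.1 == t')
            = (r :: rest).filter (fun y => y.1 == t') := by
        intro t' ht'
        have ht'gt : r.1 < t' := hSlt.1 t' ht'
        have htw : ((r :: rest).takeWhile (fun x => x.1 == r.1)).filter (fun y => y.1 == t') = [] := by
          rw [List.filter_eq_nil_iff]
          intro z hz
          have hzr : (z.1 == r.1) = true :=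
            List.mem_takeWhile_imp (p := fun x : String × String × String => x.1 == r.1) hz
          intro hzt
          exact (ne_of_gt ht'gt) (by rw [← beq_iff_eq.mp hzt, beq_iff_eq.mp hzr])
        calc ((r :: rest).dropWhile (fun x => x.1 == r.1)).filter (fun y => y.1 == t')
            = ((r :: rest).takeWhile (fun x => x.1 == r.1)).filter (fun y => y.1 == t')
                ++ ((r :: rest).dropWhile (fun x => x.1 == r.1)).filter (fun y => y.1 == t') := by
              rw [htw, List.nil_append]
          _ = (r :: rest).filter (fun y => y.1 == t') := by rw [← List.filter_append, hsplit]
      rw [pvEmit]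
      simp only [List.flatMap_cons]
      congr 1
      · congr 1
        rw [htd.1]
        simp [pvFmt]
      · rw [hih]
        refine List.flatMap_congr ?_ |>.symm
        intro t' ht'
        rw [hfil t' ht']

-- the whole equality, stated on the prefix and the dict's item list directly (no lets)
theorem pvMain (pfx : String) (L : List (String × String)) :
    (if (L.foldl (fun tc kv =>
          if PySem.Str.startswith kv.1 pfx = false then tc
          else
            let parts := (PySem.Str.split? kv.1 "|").getD []
            if parts.length ≠ 3 then tc
            else PySem.Dict.modify tc parts[1]! [] (fun l => l ++ [(parts[2]!, kv.2)]))
          PySem.Dict.empty).items.isEmpty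
     then "(No column descriptions available)"
     else PySem.Str.join "\n"
       ((PySem.List.sorted (L.foldl (fun tc kv =>
          if PySem.Str.startswith kv.1 pfx = false then tc
          else
            let parts := (PySem.Str.split? kv.1 "|").getD []
            if parts.length ≠ 3 then tc
            else PySem.Dict.modify tc parts[1]! [] (fun l => l ++ [(parts[2]!, kv.2)]))
          PySem.Dict.empty).keys (fun x => x) false).foldl
          (fun lines table_name =>
            ((L.foldl (fun tc kv =>
              if PySem.Str.startswith kv.1 pfx = false then tc
              else
                let parts := (PySem.Str.split? kv.1 "|").getD []
                if parts.length ≠ 3 then tc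
                else PySem.Dict.modify tc parts[1]! [] (fun l => l ++ [(parts[2]!, kv.2)]))
              PySem.Dict.empty).getD table_name []).foldl
              (fun lines cd => lines ++ ["  - " ++ cd.1 ++ ": " ++ cd.2])
              (lines ++ ["Table: " ++ table_name])) []))
    =
    (if (L.filterMap (pvRow pfx)).isEmpty
     then "(No column descriptions available)"
     else PySem.Str.join "\n"
       (pvEmit (PySem.List.sorted (L.filterMap (pvRow pfx)) (fun r => r.1) false))) := by
  rw [pvFilterMap_eq, pvDictFold_eq]
  set M := (L.filter (pvOk pfx)).map pvTr with hM
  set D := M.foldl (fun tc p => PySem.Dict.modify tc p.1 [] (fun l => l ++ [p.2])) PySem.Dict.empty with hD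
  have hkeys : D.keys = PySem.Set.ofList (M.map (fun x => x.1)) := by
    rw [hD, PySem.Dict.keys_foldl_modify_key M (fun x => x.1) [] (fun _ x => fun l => l ++ [x.2])]
    simp [PySem.Set.update, PySem.Set.ofList, PySem.Dict.empty, PySem.Dict.keys]
  have hgetD : ∀ t, D.getD t [] = (M.filter (fun x => x.1 == t)).map (fun x => x.2) := by
    intro t
    rw [hD, PySem.Dict.getD_foldl_modify_append M PySem.Dict.empty t]
    simp [PySem.Dict.getD, PySem.Dict.get?, PySem.Dict.empty]
  have hempty : D.items.isEmpty = M.isEmpty := by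
    rcases hMnil : M with _ | ⟨m, M'⟩
    · simp [hD, hMnil, PySem.Dict.empty]
    · have hk : D.keys ≠ [] := by
        rw [hkeys, hMnil]
        intro hc
        have hm : m.1 ∈ PySem.Set.ofList ((m :: M').map (fun x => x.1)) := by
          rw [PySem.Set.mem_ofList]; simp
        rw [hc] at hm; exact (List.not_mem_nil) hm
      have hit : D.items ≠ [] := by
        intro hc; apply hk; simp [PySem.Dict.keys, hc]
      simp [hit]
  rw [hempty]
  by_cases hM0 : M.isEmpty
  · simp only [hM0, if_true]
  · simp only [hM0, Bool.false_eq_true, if_false]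
    congr 1
    have hlines : (PySem.List.sorted D.keys (fun x => x) false).foldl
        (fun lines table_name =>
          (D.getD table_name []).foldl
            (fun lines cd => lines ++ ["  - " ++ cd.1 ++ ": " ++ cd.2])
            (lines ++ ["Table: " ++ table_name])) []
        = (PySem.List.sorted D.keys (fun x => x) false).flatMap
            (fun t => ("Table: " ++ t) :: (M.filter (fun x => x.1 == t)).map pvFmt) := by
      have hstep : (fun (lines : List String) (t : String) =>
          (D.getD t []).foldl (fun lines cd => lines ++ ["  - " ++ cd.1 ++ ": " ++ cd.2])
            (lines ++ ["Table: " ++ t]))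
          = fun lines t => lines ++ (("Table: " ++ t) :: (M.filter (fun x => x.1 == t)).map pvFmt) := by
        funext lines t
        rw [hgetD t,
          PySem.List.foldl_append_eq_flatMap (fun cd : String × String => ["  - " ++ cd.1 ++ ": " ++ cd.2])]
        rw [← List.map_eq_flatMap, List.map_map]
        simp [pvFmt, Function.comp_def]
      rw [hstep, PySem.List.foldl_append_eq_flatMap]
      simp
    have hmem : ∀ k, k ∈ PySem.List.sorted D.keys (fun x => x) false
        ↔ k ∈ (PySem.List.sorted M (fun r => r.1) false).map (fun y => y.1) := by
      intro k
      rw [PySem.List.mem_sorted, hkeys, PySem.Set.mem_ofList]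
      exact (((PySem.List.sorted_perm M (fun r => r.1) false).map (fun y => y.1)).mem_iff).symm
    have hpair : (PySem.List.sorted D.keys (fun x => x) false).Pairwise (· < ·) := by
      rw [hkeys]
      exact PySem.List.sorted_ofList_pairwise_lt _
    have hemit := pvEmit_eq (PySem.List.sorted M (fun r => r.1) false).length
      (PySem.List.sorted M (fun r => r.1) false)
      (PySem.List.sorted D.keys (fun x => x) false)
      le_rfl (PySem.List.sorted_pairwise M (fun r => r.1)) hpair hmem
    rw [hlines, hemit]
    simp only [pvSorted_filter]

-- ===== VERDICT (by name: the statement is the Claim_ definition above) =====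
theorem get_column_descriptions_spec : Claim_equal_get_column_descriptions := by
  intro db_id column_meanings _
  show get_column_descriptions db_id column_meanings = get_column_descriptions_alt db_id column_meanings
  exact pvMain (db_id ++ "|") ((PySem.Dict.ofList column_meanings).items)
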